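-- pv_equiv track=rewrite | github.com/Robertus567/Repository-Jap-Robertus-K.S-Semester-2-Alpro2 | Challenge 2 Alpro Week 5.py | find_shortest_circuit
-- ===== SOURCE A (Python) =====
-- graph = {
--     'A': ['B', 'D'],
--     'B': ['A', 'C', 'E', 'F'],
--     'C': ['B', 'F'],
--     'D': ['A', 'E'],
--     'E': ['B', 'D', 'F'],
--     'F': ['B', 'C', 'E']
-- }
--
-- def find_all_paths(start, end, path=[]):
--     """Find all paths from start to end node using DFS"""
--     path = path + [start]
--     if start == end:
--         return [path]
--     paths = []
--     for neighbor in graph[start]: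
--         if neighbor not in path:
--             new_paths = find_all_paths(neighbor, end, path)
--             paths.extend(new_paths)
--     return paths
--
-- def find_shortest_circuit(start, end):
--     """Find the shortest circuit from start to end and back to start"""
--     paths = find_all_paths(start, end)
--     if not paths:
--         return None
--
--     circuits = []
--     for path in paths:
--         # Check if end can connect back to start (completing the circuit)
--         if start in graph[end]:
--             circuits.append(path + [start])
--
--     if not circuits:
--         return None
--
--     # Return the shortest circuit
--     return min(circuits, key=len)
-- ===== SOURCE B (Python) =====
-- graph = {
--     'A': ['B', 'D'],
--     'B': ['A', 'C', 'E', 'F'],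
--     'C': ['B', 'F'],
--     'D': ['A', 'E'],
--     'E': ['B', 'D', 'F'],
--     'F': ['B', 'C', 'E']
-- }
--
-- def find_shortest_circuit(start, end):
--     """Find the shortest circuit from start to end and back to start,
--     by an explicit-stack DFS over simple paths (same discovery order
--     as the recursive version: neighbors pushed in reverse order)."""
--     paths = []
--     stack = [(start, [start])]
--     while stack:
--         node, path = stack.pop()
--         if node == end:
--             paths.append(path)
--             continue
--         for nb in reversed(graph[node]):
--             if nb not in path:
--                 stack.append((nb, path + [nb]))
--     if not paths or start not in graph[end]:
--         return None
--     return min(paths, key=len) + [start]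
-- ===== Notes on version B (the rewrite author's own statement) =====
-- stated objective: alternative
-- what changed: The recursive path enumeration is replaced by an explicit-stack iterative DFS (neighbors pushed in reverse order, preserving discovery order), and the circuits list is dropped: since the 'start in graph[end]' test is path-independent, B returns min(paths, key=len) + [start] directly.
import Mathlib
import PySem

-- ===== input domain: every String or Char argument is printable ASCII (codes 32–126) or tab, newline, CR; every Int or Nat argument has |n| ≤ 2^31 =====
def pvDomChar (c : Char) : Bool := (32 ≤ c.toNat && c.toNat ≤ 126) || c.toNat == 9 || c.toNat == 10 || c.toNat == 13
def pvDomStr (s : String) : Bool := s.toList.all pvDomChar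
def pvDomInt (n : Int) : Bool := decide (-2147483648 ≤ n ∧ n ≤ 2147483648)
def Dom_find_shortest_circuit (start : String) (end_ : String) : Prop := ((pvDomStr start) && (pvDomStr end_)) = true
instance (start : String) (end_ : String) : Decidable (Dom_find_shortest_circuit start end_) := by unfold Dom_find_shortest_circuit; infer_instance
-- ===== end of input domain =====

-- B replaces the recursive DFS by an explicit-stack DFS (same discovery order) and
-- builds the result as min(paths)+[start] instead of materialising a circuits list
-- (the 'start in graph[end]' test is path-independent); same cost, different decomposition.

-- ===== PORT A =====
def pyGraph : PySem.Dict String (List String) := PySem.Dict.ofList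
  [("A", ["B","D"]), ("B", ["A","C","E","F"]), ("C", ["B","F"]),
   ("D", ["A","E"]), ("E", ["B","D","F"]), ("F", ["B","C","E"])]

-- graph[n]; a missing key raises KeyError in Python — those inputs are excluded by Pre_
def graphGet (n : String) : List String := (PySem.Dict.get? pyGraph n).getD []

-- find_all_paths, fuel-guarded (recursion depth ≤ 7 on this 6-node graph: paths are simple)
def find_all_pathsA : Nat → String → String → List String → List (List String)
  | 0, _, _, _ => []
  | fuel+1, start, end_, path =>
    let path := path ++ [start]
    if start = end_ then [path]
    else
      (graphGet start).foldl
        (fun paths neighbor =>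
          if neighbor ∈ path then paths
          else paths ++ find_all_pathsA fuel neighbor end_ path) []

def find_shortest_circuit (start : String) (end_ : String) : Option (List String) :=
  let paths := find_all_pathsA 7 start end_ []
  if paths = [] then none
  else
    let circuits := paths.foldl
      (fun cs path => if start ∈ graphGet end_ then cs ++ [path ++ [start]] else cs) []
    if circuits = [] then none
    else PySem.List.min? circuits (fun p => p.length)

-- ===== PORT B =====
-- explicit-stack DFS loop (head of the list = top of the stack; neighbors pushed in
-- reverse adjacency order); fuel 400 bounds the pops (≤ 326 simple paths from any node)
def dfsStackB : Nat → String → List (String × List String) → List (List String) → List (List String)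
  | 0, _, _, paths => paths
  | fuel+1, end_, stack, paths =>
    match stack with
    | [] => paths
    | (node, path) :: rest =>
      if node = end_ then dfsStackB fuel end_ rest (paths ++ [path])
      else
        dfsStackB fuel end_
          ((graphGet node).reverse.foldl
            (fun st nb => if nb ∈ path then st else (nb, path ++ [nb]) :: st) rest)
          paths

def find_shortest_circuit_alt (start : String) (end_ : String) : Option (List String) :=
  let paths := dfsStackB 400 end_ [(start, [start])] []
  if paths = [] ∨ start ∉ graphGet end_ then none
  else (PySem.List.min? paths (fun p => p.length)).map (fun p => p ++ [start])

-- ===== PRECONDITION & SPEC =====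
-- Pre_ excludes exactly the inputs where Python A raises KeyError: start not a node of
-- the fixed graph (either graph[start] or, when start == end, graph[end] is missing).
def Pre_find_shortest_circuit (start : String) (end_ : String) : Prop :=
  start ∈ (["A","B","C","D","E","F"] : List String)
instance (start : String) (end_ : String) : Decidable (Pre_find_shortest_circuit start end_) := by
  unfold Pre_find_shortest_circuit; infer_instance
def pvWitness_find_shortest_circuit : String × String := ("A", "B")

def Spec_find_shortest_circuit (start : String) (end_ : String) (out : Option (List String)) : Prop := out = find_shortest_circuit_alt start end_
instance (start : String) (end_ : String) (out : Option (List String)) : Decidable (Spec_find_shortest_circuit start end_ out) := by unfold Spec_find_shortest_circuit; infer_instance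

-- ===== CLAIM (what is proved, stated in full; the proofs are below) =====
def Claim_equal_find_shortest_circuit : Prop := ∀ (start : String) (end_ : String), Dom_find_shortest_circuit start end_ → Pre_find_shortest_circuit start end_ → Spec_find_shortest_circuit start end_ (find_shortest_circuit start end_)

-- ===== LEMMAS AND PROOFS =====

def gKeys : List String := ["A","B","C","D","E","F"]

lemma graphGet_subset : ∀ n ∈ gKeys, ∀ m ∈ graphGet n, m ∈ gKeys := by decide

-- a fold that only ever appends empty new_paths returns its accumulator
lemma foldl_append_nil (F : String → List (List String)) (path : List String) :
    ∀ (l : List String), (∀ nb ∈ l, F nb = []) →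
    ∀ acc, l.foldl (fun ps nb => if nb ∈ path then ps else ps ++ F nb) acc = acc := by
  intro l
  induction l with
  | nil => intro _ acc; rfl
  | cons hd tl ih =>
    intro h acc
    simp only [List.foldl_cons]
    have hhd : F hd = [] := h hd (List.mem_cons_self)
    have htl : ∀ nb ∈ tl, F nb = [] := fun nb hnb => h nb (List.mem_cons_of_mem _ hnb)
    by_cases hm : hd ∈ path
    · rw [if_pos hm]; exact ih htl acc
    · rw [if_neg hm, hhd, List.append_nil]; exact ih htl acc

-- when the target node is not a node of the graph, A's DFS finds no path
lemma find_all_pathsA_empty (end_ : String) (hend : end_ ∉ gKeys) :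
    ∀ (fuel : Nat) (n : String) (path : List String), n ∈ gKeys →
    find_all_pathsA fuel n end_ path = [] := by
  intro fuel
  induction fuel with
  | zero => intro n path _; rfl
  | succ f ih =>
    intro n path hn
    have hne : n ≠ end_ := fun h => hend (h ▸ hn)
    simp only [find_all_pathsA, if_neg hne]
    exact foldl_append_nil _ _ (graphGet n)
      (fun nb hnb => ih nb _ (graphGet_subset n hn nb hnb)) []

-- pushing neighbors keeps every stack frame's node inside the graph
lemma foldl_push_mem (path : List String) :
    ∀ (l : List String) (rest : List (String × List String)) (fr : String × List String),
    fr ∈ l.foldl (fun st nb => if nb ∈ path then st else (nb, path ++ [nb]) :: st) rest →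
    fr.1 ∈ l ∨ fr ∈ rest := by
  intro l
  induction l with
  | nil => intro rest fr h; exact Or.inr h
  | cons hd tl ih =>
    intro rest fr h
    simp only [List.foldl_cons] at h
    rcases ih _ fr h with h1 | h2
    · exact Or.inl (List.mem_cons_of_mem _ h1)
    · by_cases hm : hd ∈ path
      · rw [if_pos hm] at h2; exact Or.inr h2
      · rw [if_neg hm] at h2
        rcases List.mem_cons.mp h2 with he | h3
        · exact Or.inl (he ▸ List.mem_cons_self)
        · exact Or.inr h3

-- when the target node is not a node of the graph, B's stack DFS collects no path
lemma dfsStackB_empty (end_ : String) (hend : end_ ∉ gKeys) :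
    ∀ (fuel : Nat) (stack : List (String × List String)) (paths : List (List String)),
    (∀ fr ∈ stack, fr.1 ∈ gKeys) →
    dfsStackB fuel end_ stack paths = paths := by
  intro fuel
  induction fuel with
  | zero => intro stack paths _; rfl
  | succ f ih =>
    intro stack paths hstack
    match stack with
    | [] => rfl
    | (node, path) :: rest =>
      have hnode : node ∈ gKeys := hstack _ List.mem_cons_self
      have hne : node ≠ end_ := fun h => hend (h ▸ hnode)
      simp only [dfsStackB, if_neg hne]
      apply ih
      intro fr hfr
      rcases foldl_push_mem path _ rest fr hfr with h1 | h2
      · exact graphGet_subset node hnode fr.1 (List.mem_reverse.mp h1)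
      · exact hstack fr (List.mem_cons_of_mem _ h2)

-- the 36 in-graph cases, by computation
lemma both_in_keys : ∀ s ∈ gKeys, ∀ e ∈ gKeys,
    find_shortest_circuit s e = find_shortest_circuit_alt s e := by decide

-- ===== VERDICT (by name: the statement is the Claim_ definition above) =====
theorem find_shortest_circuit_spec : Claim_equal_find_shortest_circuit := by
  intro start end_ _ hpre
  unfold Spec_find_shortest_circuit
  have hs : start ∈ gKeys := hpre
  by_cases hk : end_ ∈ gKeys
  · exact both_in_keys start hs end_ hk
  · have hA : find_all_pathsA 7 start end_ [] = [] :=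
      find_all_pathsA_empty end_ hk 7 start [] hs
    have hB : dfsStackB 400 end_ [(start, [start])] [] = [] :=
      dfsStackB_empty end_ hk 400 _ []
        (by intro fr hfr; simp only [List.mem_singleton] at hfr; simpa [hfr] using hs)
    simp [find_shortest_circuit, find_shortest_circuit_alt, hA, hB]
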